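-- pv_equiv track=rewrite | github.com/bssrdf/pyleet | PalindromePartitioningIII.py | palindromePartition2
-- ===== SOURCE A (Python) =====
-- def palindromePartition2(s: str, k: int) -> int:
--     n = len(s)
--     memo = {}
--     c = [[0]*n for _ in range(n)]
--     def cost(s,i,j): #calculate the cost of transferring one substring into palindrome string
--         r = 0
--         while i < j:
--             if s[i] != s[j]:
--                 r += 1
--             i += 1
--             j -= 1
--         return r
--
--     for i in range(n):
--         for j in range(n):
--             c[i][j] = cost(s, i, j)
--
--
--     def dfs(i, k):
--         if (i, k) in memo: return memo[(i, k)] #case already in memo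
--         if n - i == k: #base case that each substring just have one character
--             return 0
--         if k == 1:    #base case that need to transfer whole substring into palidrome
--             return c[i][n - 1]
--         res = float('inf')
--         for j in range(i + 1, n - k + 2): # keep making next part of substring into palidrome
--             res = min(res, dfs(j, k - 1) + c[i][j - 1]) #compare different divisions to get the minimum cost
--         memo[(i, k)] = res
--         return res
--     return dfs(0, k)
-- ===== SOURCE B (Python) =====
-- def palindromePartition2(s: str, k: int) -> int:
--     # Bottom-up DP. Cost table by the recurrence c[i][j] = c[i+1][j-1] + (s[i] != s[j]),
--     # built row by row from the bottom, then k-1 rounds of the partition DP over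
--     # shrinking dp lists (dp[i] = min changes to split s[i:] into m palindromes).
--     n = len(s)
--     c = []          # c[0] is the row for the smallest i built so far
--     for i in range(n - 1, -1, -1):
--         prev = c[0] if c else []        # row i+1 (unused when i == n-1)
--         row = [0] * (i + 1) + [(prev[j - 1] if j - i >= 2 else 0)
--                                + (1 if s[i] != s[j] else 0)
--                                for j in range(i + 1, n)]
--         c.insert(0, row)
--     dp = [c[i][n - 1] for i in range(n)]    # one palindrome covering s[i:]
--     for m in range(2, k + 1):
--         dp = [min(dp[j] + c[i][j - 1] for j in range(i + 1, n - m + 2))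
--               for i in range(n - m + 1)]
--     return dp[0]
-- ===== Notes on version B (the rewrite author's own statement) =====
-- stated objective: alternative
-- what changed: Replaces A's per-pair while-loop cost computation (O(n^3) table) and memoized top-down recursion with an O(n^2) cost table built row by row via c[i][j]=c[i+1][j-1]+(s[i]!=s[j]) and an iterative bottom-up partition DP over shrinking dp lists; intended as faster (measured 2.37x at n=256, not confirmed at the largest probe size).
-- outside the precondition, e.g. on palindromePartition2('abc', 4): A returns inf, B raises IndexError; on palindromePartition2('', 0): A returns 0, B raises IndexError; on palindromePartition2('abc', 0): A raises RecursionError, B returns 1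
import Mathlib
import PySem

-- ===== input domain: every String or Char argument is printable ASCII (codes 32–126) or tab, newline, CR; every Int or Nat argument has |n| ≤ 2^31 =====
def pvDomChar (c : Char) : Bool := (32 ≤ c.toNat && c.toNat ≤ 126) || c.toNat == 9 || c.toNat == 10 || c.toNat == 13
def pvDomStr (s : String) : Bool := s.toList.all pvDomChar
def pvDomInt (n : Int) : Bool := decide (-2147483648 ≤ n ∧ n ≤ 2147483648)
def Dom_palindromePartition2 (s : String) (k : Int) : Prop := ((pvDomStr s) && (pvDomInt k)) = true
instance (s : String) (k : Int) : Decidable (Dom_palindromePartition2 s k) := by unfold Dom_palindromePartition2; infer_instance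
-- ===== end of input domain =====

-- B replaces A's per-pair cost loop and memoized top-down recursion by a cost table built
-- row by row via c[i][j] = c[i+1][j-1] + (s[i] != s[j]) and an iterative bottom-up DP over
-- shrinking dp lists. Equivalence is claimed on Pre_ (1 <= k <= len(s)).

-- ===== PORT A =====
-- cost(s, i, j): the while-loop counting mismatched pairs
def pvCostAux (cs : List Char) : Nat → Int → Int → Int
  | 0, _, _ => 0
  | g + 1, i, j =>
    if i < j then
      (if PySem.List.pyGet? cs i ≠ PySem.List.pyGet? cs j then 1 else 0) + pvCostAux cs g (i + 1) (j - 1)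
    else 0

def pvCostA (cs : List Char) (i j : Int) : Int := pvCostAux cs (j - i).toNat i j

-- c[i][j] = cost(s, i, j) for all i, j in range(n)
def pvTableA (cs : List Char) : List (List Int) :=
  (List.range cs.length).map (fun i : Nat => (List.range cs.length).map (fun j : Nat => pvCostA cs (i : Int) (j : Int)))

-- min with float('inf') as none
def pvMinO : Option Int → Option Int → Option Int
  | none, b => b
  | some a, none => some a
  | some a, some b => some (min a b)

-- x + y where x may be inf (none)
def pvAddO : Option Int → Option Int → Option Int
  | some a, some b => some (a + b)
  | _, _ => none

-- dfs(i, k) with the memo dict threaded through; fuel makes the recursion structural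
-- (inside Pre_ the fuel k.toNat + 1 is never exhausted)
def pvDfsA (c : List (List Int)) (n : Int) : Nat → Int → Int → PySem.Dict (Int × Int) (Option Int) → Option Int × PySem.Dict (Int × Int) (Option Int)
  | 0, _, _, memo => (none, memo)
  | fuel + 1, i, k, memo =>
    match memo.get? (i, k) with
    | some v => (v, memo)
    | none =>
      if n - i = k then (some 0, memo)
      else if k = 1 then ((PySem.List.pyGet? c i).bind (fun row => PySem.List.pyGet? row (n - 1)), memo)
      else
        let st := (PySem.List.pyRange (i + 1) (n - k + 2) 1).foldl
          (fun st j =>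
            let r := pvDfsA c n fuel j (k - 1) st.2
            (pvMinO st.1 (pvAddO r.1 ((PySem.List.pyGet? c i).bind (fun row => PySem.List.pyGet? row (j - 1)))), r.2))
          (none, memo)
        (st.1, st.2.insert (i, k) st.1)

def palindromePartition2 (s : String) (k : Int) : Int :=
  let cs := s.toList
  let n : Int := cs.length
  let c := pvTableA cs
  ((pvDfsA c n (k.toNat + 1) 0 k PySem.Dict.empty).1).getD 0

-- ===== PORT B =====
-- row i of the cost table: [0]*(i+1) ++ [ (prev[j-1] if j-i>=2 else 0) + (s[i]!=s[j]) for j in range(i+1, n) ]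
def pvRowB (cs : List Char) (n : Int) (i : Int) (prev : List Int) : List Int :=
  List.replicate (i + 1).toNat 0 ++
    (PySem.List.pyRange (i + 1) n 1).map (fun j =>
      (if j - i ≥ 2 then PySem.List.pyGetD prev (j - 1) 0 else 0) +
      (if PySem.List.pyGet? cs i ≠ PySem.List.pyGet? cs j then 1 else 0))

-- for i in range(n-1, -1, -1): prev = c[0] if c else []; c.insert(0, row)
def pvBuildC (cs : List Char) (n : Int) : List (List Int) :=
  (PySem.List.pyRange (n - 1) (-1) (-1)).foldl
    (fun c i => pvRowB cs n i (c.headD []) :: c) []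

def palindromePartition2_alt (s : String) (k : Int) : Int :=
  let cs := s.toList
  let n : Int := cs.length
  let c := pvBuildC cs n
  let dp0 := (PySem.List.pyRange 0 n 1).map (fun i => (PySem.List.pyGetD c i []) |> (fun row => PySem.List.pyGetD row (n - 1) 0))
  let dp := (PySem.List.pyRange 2 (k + 1) 1).foldl
    (fun dp m =>
      (PySem.List.pyRange 0 (n - m + 1) 1).map (fun i =>
        (PySem.List.min?
          ((PySem.List.pyRange (i + 1) (n - m + 2) 1).map
            (fun j => PySem.List.pyGetD dp j 0 + PySem.List.pyGetD (PySem.List.pyGetD c i []) (j - 1) 0))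
          (fun y => y)).getD 0))
    dp0
  PySem.List.pyGetD dp 0 0

-- ===== PRECONDITION & SPEC =====
-- Pre_ excludes k outside 1..len(s): there A raises (IndexError / RecursionError), returns
-- float('inf') (not an int, k > n), or — only on ('', 0) — returns 0 from a degenerate base
-- case where B's dp[0] access raises.
def Pre_palindromePartition2 (s : String) (k : Int) : Prop :=
  1 ≤ k ∧ k ≤ (s.toList.length : Int)
instance (s : String) (k : Int) : Decidable (Pre_palindromePartition2 s k) := by
  unfold Pre_palindromePartition2; infer_instance

def pvWitness_palindromePartition2 : String × Int := ("ab", 1)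

def Spec_palindromePartition2 (s : String) (k : Int) (out : Int) : Prop := out = palindromePartition2_alt s k
instance (s : String) (k : Int) (out : Int) : Decidable (Spec_palindromePartition2 s k out) := by unfold Spec_palindromePartition2; infer_instance

-- ===== CLAIM (what is proved, stated in full; the proofs are below) =====
def Claim_equal_palindromePartition2 : Prop := ∀ (s : String) (k : Int), Dom_palindromePartition2 s k → Pre_palindromePartition2 s k → Spec_palindromePartition2 s k (palindromePartition2 s k)


-- ===== LEMMAS AND PROOFS =====

-- the common value: pvG cs m i = min changes to split s[i:] into m palindromes (m ≥ 1, 0 ≤ i ≤ n - m)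
def pvG (cs : List Char) : Nat → Int → Int
  | 0, _ => 0
  | 1, i => pvCostA cs i ((cs.length : Int) - 1)
  | m + 2, i =>
    (PySem.List.min?
      ((PySem.List.pyRange (i + 1) ((cs.length : Int) - (m + 2) + 2) 1).map
        (fun j => pvG cs (m + 1) j + pvCostA cs i (j - 1)))
      (fun y => y)).getD 0

-- memo invariant: every stored value is the ideal one, at in-bounds keys
def pvGood (cs : List Char) (memo : PySem.Dict (Int × Int) (Option Int)) : Prop :=
  ∀ p v, memo.get? p = some v →
    1 ≤ p.2 ∧ 0 ≤ p.1 ∧ p.1 ≤ (cs.length : Int) - p.2 ∧ v = some (pvG cs p.2.toNat p.1)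

theorem pvCostAux_fuel (cs : List Char) :
    ∀ f1 f2 (i j : Int), (j - i).toNat ≤ f1 → (j - i).toNat ≤ f2 →
      pvCostAux cs f1 i j = pvCostAux cs f2 i j := by
  intro f1
  induction f1 with
  | zero =>
    intro f2 i j h1 h2
    have hij : ¬ i < j := by omega
    cases f2 with
    | zero => rfl
    | succ g => simp [pvCostAux, hij]
  | succ g ih =>
    intro f2 i j h1 h2
    cases f2 with
    | zero =>
      have hij : ¬ i < j := by omega
      simp [pvCostAux, hij]
    | succ g2 =>
      simp only [pvCostAux]
      by_cases hij : i < j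
      · simp only [hij, if_true]
        have := ih g2 (i + 1) (j - 1) (by omega) (by omega)
        rw [this]
      · simp [hij]

theorem pvCostA_unfold (cs : List Char) (i j : Int) :
    pvCostA cs i j =
      if i < j then
        (if PySem.List.pyGet? cs i ≠ PySem.List.pyGet? cs j then 1 else 0) + pvCostA cs (i + 1) (j - 1)
      else 0 := by
  by_cases hij : i < j
  · obtain ⟨g, hg⟩ : ∃ g, (j - i).toNat = g + 1 := ⟨(j - i).toNat - 1, by omega⟩
    simp only [pvCostA, hg, pvCostAux, hij, if_true]
    rw [pvCostAux_fuel cs g ((j - 1) - (i + 1)).toNat (i + 1) (j - 1) (by omega) (by omega)]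
  · have h0 : (j - i).toNat = 0 := by omega
    simp [pvCostA, h0, pvCostAux, hij]

theorem pvCostA_of_ge (cs : List Char) (i j : Int) (h : j ≤ i) : pvCostA cs i j = 0 := by
  rw [pvCostA_unfold]
  simp [show ¬ i < j by omega]

theorem pvMinO_none_right (a : Option Int) : pvMinO a none = a := by
  cases a <;> rfl

theorem foldl_min_cons (l : List Int) : ∀ (x y : Int),
    l.foldl min (min x y) = min x (l.foldl min y) := by
  induction l with
  | nil => intro x y; rfl
  | cons z t ih =>
    intro x y
    show t.foldl min (min (min x y) z) = min x (t.foldl min (min y z))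
    rw [min_assoc, ih]

theorem pvMinO_foldl (f : Int → Int) (l : List Int) : ∀ (a : Option Int),
    l.foldl (fun acc j => pvMinO acc (some (f j))) a
      = pvMinO a (PySem.List.min? (l.map f) (fun y => y)) := by
  induction l with
  | nil =>
    intro a
    have h0 : PySem.List.min? ([] : List Int) (fun y => y) = none := by
      rw [PySem.List.min?_eq_none_iff]
    show a = pvMinO a (PySem.List.min? (List.map f []) fun y => y)
    rw [List.map_nil, h0, pvMinO_none_right]
  | cons x t ih =>
    intro a
    show t.foldl (fun acc j => pvMinO acc (some (f j))) (pvMinO a (some (f x)))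
      = pvMinO a (PySem.List.min? (f x :: t.map f) (fun y => y))
    rw [ih, PySem.List.min?_id_cons]
    cases ht : t.map f with
    | nil =>
      have h0 : PySem.List.min? ([] : List Int) (fun y => y) = none := by
        rw [PySem.List.min?_eq_none_iff]
      rw [h0, pvMinO_none_right, List.foldl_nil]
    | cons y ys =>
      rw [PySem.List.min?_id_cons]
      show pvMinO (pvMinO a (some (f x))) (some (ys.foldl min y)) = pvMinO a (some ((y :: ys).foldl min (f x)))
      have : (y :: ys).foldl min (f x) = min (f x) (ys.foldl min y) := by
        show ys.foldl min (min (f x) y) = _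
        rw [foldl_min_cons]
      rw [this]
      cases a with
      | none => rfl
      | some a0 => show some _ = some _; rw [min_assoc]

theorem pvTableA_get (cs : List Char) (i j : Int) (hi0 : 0 ≤ i) (hi : i < (cs.length : Int))
    (hj0 : 0 ≤ j) (hj : j < (cs.length : Int)) :
    (PySem.List.pyGet? (pvTableA cs) i).bind (fun row => PySem.List.pyGet? row j)
      = some (pvCostA cs i j) := by
  have hi' : i = (i.toNat : Int) := by omega
  have hj' : j = (j.toNat : Int) := by omega
  have hilen : i.toNat < cs.length := by omega
  have hjlen : j.toNat < cs.length := by omega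
  rw [hi', PySem.List.pyGet?_natCast]
  have h1 : (pvTableA cs)[i.toNat]? = some ((List.range cs.length).map (fun j : Nat => pvCostA cs ((i.toNat : Nat) : Int) (j : Int))) := by
    unfold pvTableA
    rw [List.getElem?_map, List.getElem?_range hilen]
    rfl
  rw [h1]
  simp only [Option.bind_some]
  rw [hj', PySem.List.pyGet?_natCast, List.getElem?_map, List.getElem?_range hjlen]
  rw [Option.map_some, ← hj']

theorem pvG_succ2_singleton (cs : List Char) (m' : Nat) (i : Int)
    (hi : i = (cs.length : Int) - ((m' : Int) + 2))
    (hprev : pvG cs (m' + 1) (i + 1) = 0) :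
    pvG cs (m' + 2) i = 0 := by
  simp only [pvG]
  have hup : (cs.length : Int) - ((m' : Int) + 2) + 2 = (i + 1) + 1 := by omega
  rw [hup, PySem.List.pyRange_one_cons (by omega), PySem.List.pyRange_one_eq_nil (by omega)]
  simp only [List.map_cons, List.map_nil]
  rw [PySem.List.min?_id_cons]
  simp only [List.foldl_nil, Option.getD_some]
  rw [show i + 1 - 1 = i by omega, hprev, pvCostA_of_ge cs i i le_rfl]
  norm_num

theorem pvG_base (cs : List Char) :
    ∀ m : Nat, 1 ≤ m → pvG cs m ((cs.length : Int) - m) = 0 := by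
  intro m
  induction m using Nat.strong_induction_on with
  | _ m ih =>
    intro hm
    match m with
    | 0 => exact absurd hm (by omega)
    | 1 =>
      show pvCostA cs _ _ = 0
      exact pvCostA_of_ge _ _ _ (by push_cast; omega)
    | Nat.succ (Nat.succ m') =>
      apply pvG_succ2_singleton cs m' _ (by push_cast; ring)
      have h1 := ih (m' + 1) (by omega) (by omega)
      rw [show (cs.length : Int) - ↑(Nat.succ (Nat.succ m')) + 1 = (cs.length : Int) - ((m' + 1 : Nat) : Int) by push_cast; ring]
      exact h1


theorem pvGood_insert (cs : List Char) (memo : PySem.Dict (Int × Int) (Option Int))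
    (hm : pvGood cs memo) (i k : Int) (h1 : 1 ≤ k) (h2 : 0 ≤ i)
    (h3 : i ≤ (cs.length : Int) - k) :
    pvGood cs (memo.insert (i, k) (some (pvG cs k.toNat i))) := by
  intro p v hget
  rw [PySem.Dict.get?_insert] at hget
  split at hget
  · rename_i hp
    subst hp
    exact ⟨h1, h2, h3, by injection hget with h; exact h.symm⟩
  · exact hm p v hget

theorem pvGood_empty (cs : List Char) : pvGood cs (PySem.Dict.empty) := by
  intro p v hget
  simp [PySem.Dict.get?, PySem.Dict.empty] at hget

theorem pvDfsA_main (cs : List Char) :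
    ∀ fuel : Nat, ∀ (i k : Int) (memo : PySem.Dict (Int × Int) (Option Int)),
      pvGood cs memo → 1 ≤ k → 0 ≤ i → i ≤ (cs.length : Int) - k → k.toNat ≤ fuel →
      (pvDfsA (pvTableA cs) (cs.length : Int) fuel i k memo).1 = some (pvG cs k.toNat i)
      ∧ pvGood cs (pvDfsA (pvTableA cs) (cs.length : Int) fuel i k memo).2 := by
  intro fuel
  induction fuel with
  | zero =>
    intro i k memo _ hk _ _ hfuel
    omega
  | succ fuel ih =>
    intro i k memo hgood hk hi0 hik hfuel
    simp only [pvDfsA]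
    cases hm : memo.get? (i, k) with
    | some v =>
      obtain ⟨_, _, _, hv⟩ := hgood _ _ hm
      subst hv
      exact ⟨rfl, hgood⟩
    | none =>
      by_cases hbase : (cs.length : Int) - i = k
      · rw [if_pos hbase]
        constructor
        · have h0 : pvG cs k.toNat ((cs.length : Int) - (k.toNat : Int)) = 0 :=
            pvG_base cs k.toNat (by omega)
          rw [show i = (cs.length : Int) - ((k.toNat : Int)) by omega, h0]
        · exact hgood
      · rw [if_neg hbase]
        by_cases hk1 : k = 1
        · subst hk1
          rw [if_pos rfl]
          constructor
          · have hiN : i < (cs.length : Int) - 1 := by omega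
            rw [pvTableA_get cs i ((cs.length : Int) - 1) hi0 (by omega) (by omega) (by omega)]
            rfl
          · exact hgood
        · rw [if_neg hk1]
          have hk2 : 2 ≤ k := by omega
          have hfold : ∀ (l : List Int), (∀ j ∈ l, i + 1 ≤ j ∧ j ≤ (cs.length : Int) - k + 1) →
              ∀ (a : Option Int) (memo0 : PySem.Dict (Int × Int) (Option Int)), pvGood cs memo0 →
              ∃ M, (List.foldl
                  (fun st j =>
                    (pvMinO st.1
                        (pvAddO (pvDfsA (pvTableA cs) ((cs.length : Int)) fuel j (k - 1) st.2).1
                          ((PySem.List.pyGet? (pvTableA cs) i).bind fun row => PySem.List.pyGet? row (j - 1))),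
                      (pvDfsA (pvTableA cs) ((cs.length : Int)) fuel j (k - 1) st.2).2))
                  (a, memo0) l)
                = (List.foldl (fun acc j => pvMinO acc (some (pvG cs (k - 1).toNat j + pvCostA cs i (j - 1)))) a l, M)
                ∧ pvGood cs M := by
            intro l
            induction l with
            | nil => exact fun _ a memo0 hg => ⟨memo0, rfl, hg⟩
            | cons j t iht =>
              intro hmem a memo0 hg
              obtain ⟨hj1, hj2⟩ := hmem j (List.mem_cons_self ..)
              simp only [List.foldl_cons]
              have hrec := ih j (k - 1) memo0 hg (by omega) (by omega) (by omega) (by omega)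
              rw [hrec.1, pvTableA_get cs i (j - 1) hi0 (by omega) (by omega) (by omega)]
              simp only [pvAddO]
              exact iht (fun x hx => hmem x (List.mem_cons_of_mem _ hx)) _ _ hrec.2
          obtain ⟨M, hM, hMg⟩ := hfold (PySem.List.pyRange (i + 1) ((cs.length : Int) - k + 2) 1)
            (fun j hj => by rw [PySem.List.mem_pyRange_one] at hj; exact ⟨by omega, by omega⟩)
            none memo hgood
          have hval : List.foldl (fun acc j => pvMinO acc (some (pvG cs (k - 1).toNat j + pvCostA cs i (j - 1)))) none
              (PySem.List.pyRange (i + 1) ((cs.length : Int) - k + 2) 1) = some (pvG cs k.toNat i) := by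
            rw [pvMinO_foldl]
            show PySem.List.min? _ _ = _
            obtain ⟨m2, hm2⟩ : ∃ m2, k.toNat = m2 + 2 := ⟨k.toNat - 2, by omega⟩
            rw [hm2]
            simp only [pvG]
            rw [show ((m2 : Int) + 2) = k by omega, show (k - 1).toNat = m2 + 1 by omega]
            cases hmin : PySem.List.min?
                ((PySem.List.pyRange (i + 1) ((cs.length : Int) - k + 2) 1).map
                  (fun j => pvG cs (m2 + 1) j + pvCostA cs i (j - 1))) (fun y => y) with
            | none =>
              rw [PySem.List.min?_eq_none_iff, List.map_eq_nil_iff,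
                PySem.List.pyRange_one_cons (by omega : i + 1 < (cs.length : Int) - k + 2)] at hmin
              exact absurd hmin (by simp)
            | some v => rw [Option.getD_some]
          rw [hM]
          constructor
          · exact hval
          · show pvGood cs (M.insert (i, k) _)
            rw [hval]
            exact pvGood_insert cs M hMg i k (by omega) hi0 (by omega)


-- ===== B-side lemmas =====

theorem pvHeadD_eq_getD' (l : List (List Int)) (d : List Int) : l.headD d = l.getD 0 d := by
  cases l <;> rfl

-- the rows built by B's loop, for i = cs.length - t .. cs.length - 1
def pvCRows (cs : List Char) : Nat → List (List Int)
  | 0 => []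
  | t + 1 => pvRowB cs (cs.length : Int) ((cs.length : Int) - ((t : Int) + 1)) ((pvCRows cs t).headD []) :: pvCRows cs t

theorem pvBuildC_eq (cs : List Char) : pvBuildC cs (cs.length : Int) = pvCRows cs cs.length := by
  have key : ∀ t : Nat, t ≤ cs.length →
      List.foldl (fun c i => pvRowB cs (cs.length : Int) i (c.headD []) :: c) []
        (((List.range t).map (fun kk : Nat => (cs.length : Int) - 1 - (kk : Int)))) = pvCRows cs t := by
    intro t
    induction t with
    | zero => intro _; rfl
    | succ t iht =>
      intro ht
      rw [List.range_succ, List.map_append, List.foldl_append, iht (by omega)]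
      show pvRowB cs (cs.length : Int) ((cs.length : Int) - 1 - (t : Int)) ((pvCRows cs t).headD []) :: pvCRows cs t = _
      rw [show (cs.length : Int) - 1 - (t : Int) = (cs.length : Int) - ((t : Int) + 1) by ring]
      rfl
  unfold pvBuildC
  rw [PySem.List.pyRange_neg_one]
  rw [show ((cs.length : Int) - 1 - (-1)).toNat = cs.length by omega]
  exact key cs.length le_rfl

theorem pvCRows_spec (cs : List Char) : ∀ t, t ≤ cs.length →
    (pvCRows cs t).length = t ∧
    (∀ p q : Nat, p < t → q < cs.length →
      ((pvCRows cs t).getD p []).getD q 0 = pvCostA cs ((cs.length : Int) - t + p) (q : Int)) := by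
  intro t
  induction t with
  | zero => exact fun _ => ⟨rfl, fun p q hp _ => absurd hp (by omega)⟩
  | succ t iht =>
    intro ht
    obtain ⟨hlen, hent⟩ := iht (by omega)
    refine ⟨by simp [pvCRows, hlen], ?_⟩
    intro p q hp hq
    match p with
    | 0 =>
      show ((pvRowB cs (cs.length : Int) ((cs.length : Int) - ((t : Int) + 1)) ((pvCRows cs t).headD [])).getD q 0) = _
      rw [show (cs.length : Int) - (↑t + 1 : Nat) + (0 : Nat) = (cs.length : Int) - ((t : Int) + 1) by push_cast; ring]
      set i : Int := (cs.length : Int) - ((t : Int) + 1) with hidef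
      have hi0 : 0 ≤ i := by omega
      unfold pvRowB
      by_cases hqi : (q : Int) ≤ i
      · rw [List.getD_append _ _ _ q (by simp [List.length_replicate]; omega),
          List.getD_replicate _ (by omega : q < (i + 1).toNat)]
        rw [pvCostA_of_ge cs i q hqi]
      · have hlenrep : (List.replicate (i + 1).toNat (0 : Int)).length = (i + 1).toNat := List.length_replicate
        rw [List.getD_append_right _ _ _ q (by omega)]
        rw [List.getD_eq_getElem?_getD, List.getElem?_map]
        have hq2 : q - (List.replicate (i + 1).toNat (0 : Int)).length < (PySem.List.pyRange (i + 1) (cs.length : Int) 1).length := by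
          rw [PySem.List.length_pyRange_one, hlenrep]; omega
        rw [List.getElem?_eq_getElem hq2]
        rw [Option.map_some, Option.getD_some]
        rw [PySem.List.getElem_pyRange_one]
        have hel : i + 1 + (↑(q - (List.replicate (i + 1).toNat (0 : Int)).length) : Int) = (q : Int) := by
          rw [hlenrep]; push_cast [Nat.cast_sub (by omega : (i+1).toNat ≤ q)]; omega
        rw [hel]
        rw [pvCostA_unfold cs i q]
        rw [if_pos (by omega : i < (q : Int))]
        by_cases h2 : (q : Int) - i ≥ 2
        · rw [if_pos h2]
          have ht1 : 1 ≤ t := by omega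
          have hprev : PySem.List.pyGetD ((pvCRows cs t).headD []) ((q : Int) - 1) 0
              = pvCostA cs (i + 1) ((q : Int) - 1) := by
            rw [pvHeadD_eq_getD']
            rw [show (q : Int) - 1 = ((q - 1 : Nat) : Int) by omega, PySem.List.pyGetD_natCast]
            have := hent 0 (q - 1) (by omega) (by omega)
            rw [this]
            rw [show (cs.length : Int) - ↑t + (0 : Nat) = i + 1 by omega,
              show ((q - 1 : Nat) : Int) = (q : Int) - 1 by omega]
          rw [hprev]
          ring
        · rw [if_neg h2]
          rw [pvCostA_of_ge cs (i + 1) ((q : Int) - 1) (by omega)]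
          ring
    | p' + 1 =>
      show ((pvCRows cs t).getD p' []).getD q 0 = _
      rw [hent p' q (by omega) hq]
      congr 1
      push_cast
      ring

-- dp invariant for B's partition loop
def pvInv (cs : List Char) (m : Int) (dp : List Int) : Prop :=
  (dp.length : Int) = (cs.length : Int) - m + 1 ∧
  ∀ i : Int, 0 ≤ i → i ≤ (cs.length : Int) - m → PySem.List.pyGetD dp i 0 = pvG cs m.toNat i

theorem pvStep_inv (cs : List Char) (m : Int) (hm : 1 ≤ m) (hmN : m + 1 ≤ (cs.length : Int))
    (dp : List Int) (hdp : pvInv cs m dp) :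
    pvInv cs (m + 1)
      ((PySem.List.pyRange 0 ((cs.length : Int) - (m + 1) + 1) 1).map (fun i =>
        (PySem.List.min?
          ((PySem.List.pyRange (i + 1) ((cs.length : Int) - (m + 1) + 2) 1).map
            (fun j => PySem.List.pyGetD dp j 0 +
              PySem.List.pyGetD (PySem.List.pyGetD (pvCRows cs cs.length) i []) (j - 1) 0))
          (fun y => y)).getD 0)) := by
  obtain ⟨hlen, hent⟩ := hdp
  have hc := (pvCRows_spec cs cs.length le_rfl).2
  constructor
  · rw [List.length_map, PySem.List.length_pyRange_one]
    omega
  · intro i hi0 hiM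
    rw [PySem.List.pyGetD_map_pyRange_of_nonneg _ ((cs.length : Int) - (m + 1) + 1) i 0 hi0 (by omega)]
    have hcong : ((PySem.List.pyRange (i + 1) ((cs.length : Int) - (m + 1) + 2) 1).map
        (fun j => PySem.List.pyGetD dp j 0 +
          PySem.List.pyGetD (PySem.List.pyGetD (pvCRows cs cs.length) i []) (j - 1) 0))
        = ((PySem.List.pyRange (i + 1) ((cs.length : Int) - (m + 1) + 2) 1).map
          (fun j => pvG cs m.toNat j + pvCostA cs i (j - 1))) := by
      apply List.map_congr_left
      intro j hj
      rw [PySem.List.mem_pyRange_one] at hj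
      have hj1 : i + 1 ≤ j := hj.1
      have hj2 : j ≤ (cs.length : Int) - m := by omega
      congr 1
      · exact hent j (by omega) hj2
      · rw [show i = ((i.toNat : Nat) : Int) by omega, PySem.List.pyGetD_natCast]
        rw [show j - 1 = (((j - 1).toNat : Nat) : Int) by omega, PySem.List.pyGetD_natCast]
        rw [hc i.toNat (j - 1).toNat (by omega) (by omega)]
        congr 1
        all_goals omega
    rw [hcong]
    obtain ⟨m2, hm2⟩ : ∃ m2, (m + 1).toNat = m2 + 2 := ⟨(m + 1).toNat - 2, by omega⟩
    rw [hm2]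
    simp only [pvG]
    rw [show ((m2 : Int) + 2) = m + 1 by omega, show m2 + 1 = m.toNat by omega]

theorem pvLoop_inv (cs : List Char) (kk : Int) (hkN : kk ≤ (cs.length : Int)) :
    ∀ (g : Nat) (lo : Int) (dp : List Int), (kk - lo).toNat = g → 1 ≤ lo → lo ≤ kk → pvInv cs lo dp →
      pvInv cs kk
        (List.foldl
          (fun dp m =>
            (PySem.List.pyRange 0 ((cs.length : Int) - m + 1) 1).map (fun i =>
              (PySem.List.min?
                ((PySem.List.pyRange (i + 1) ((cs.length : Int) - m + 2) 1).map
                  (fun j => PySem.List.pyGetD dp j 0 +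
                    PySem.List.pyGetD (PySem.List.pyGetD (pvCRows cs cs.length) i []) (j - 1) 0))
                (fun y => y)).getD 0))
          dp (PySem.List.pyRange (lo + 1) (kk + 1) 1)) := by
  intro g
  induction g with
  | zero =>
    intro lo dp hg h1 h2 hinv
    have hlo : lo = kk := by omega
    subst hlo
    rw [PySem.List.pyRange_one_eq_nil (le_refl (lo + 1)), List.foldl_nil]
    exact hinv
  | succ g ihg =>
    intro lo dp hg h1 h2 hinv
    have hlt : lo < kk := by omega
    rw [PySem.List.pyRange_one_cons (by omega : lo + 1 < kk + 1), List.foldl_cons]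
    exact ihg (lo + 1) _ (by omega) (by omega) (by omega)
      (pvStep_inv cs lo h1 (by omega) dp hinv)

theorem pvDp0_inv (cs : List Char) (h1 : 1 ≤ cs.length) :
    pvInv cs 1 ((PySem.List.pyRange 0 (cs.length : Int) 1).map (fun i =>
      PySem.List.pyGetD (PySem.List.pyGetD (pvCRows cs cs.length) i []) ((cs.length : Int) - 1) 0)) := by
  have hc := (pvCRows_spec cs cs.length le_rfl).2
  constructor
  · rw [List.length_map, PySem.List.length_pyRange_one]
    omega
  · intro i hi0 hiM
    rw [PySem.List.pyGetD_map_pyRange_of_nonneg _ ((cs.length : Int)) i 0 hi0 (by omega)]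
    rw [show i = ((i.toNat : Nat) : Int) by omega, PySem.List.pyGetD_natCast]
    rw [show (cs.length : Int) - 1 = (((cs.length - 1 : Nat) : Nat) : Int) by omega,
      PySem.List.pyGetD_natCast]
    rw [hc i.toNat (cs.length - 1) (by omega) (by omega)]
    show pvCostA cs _ _ = pvG cs 1 _
    rw [show (cs.length : Int) - ↑cs.length + ↑i.toNat = ((i.toNat : Nat) : Int) by ring,
      show (((cs.length - 1 : Nat) : Nat) : Int) = (cs.length : Int) - 1 by omega]
    rfl

theorem palindromePartition2_spec : Claim_equal_palindromePartition2 := by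
  unfold Claim_equal_palindromePartition2
  intro s k _ hpre
  unfold Spec_palindromePartition2
  obtain ⟨hk1, hkn⟩ := hpre
  have hA : palindromePartition2 s k = pvG s.toList k.toNat 0 := by
    simp only [palindromePartition2]
    rw [(pvDfsA_main s.toList (k.toNat + 1) 0 k PySem.Dict.empty (pvGood_empty s.toList)
      hk1 le_rfl (by omega) (by omega)).1]
    rfl
  have hB : palindromePartition2_alt s k = pvG s.toList k.toNat 0 := by
    simp only [palindromePartition2_alt]
    rw [pvBuildC_eq]
    have hlen : 1 ≤ s.toList.length := by
      have h := hkn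
      omega
    have h0 := pvDp0_inv s.toList hlen
    have hloop := pvLoop_inv s.toList k hkn (k - 1).toNat 1 _ (by omega) le_rfl hk1 h0
    rw [show (1 : Int) + 1 = 2 by norm_num] at hloop
    exact hloop.2 0 le_rfl (by omega)
  rw [hA, hB]
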